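-- pv_equiv track=rewrite | github.com/siddhiparkar151992/DataStrcucturesImpl | RedJohn.py | F
-- ===== SOURCE A (Python) =====
-- def gcd(x, y):
--     while y != 0:
--         (x, y) = (y, x % y)
--     return x
--
-- def F(x):
--     a = range(x)
--     if x ==1:
--         return 1
--     result = 0
--     for i in range(1,x+1):
--         result+= gcd(i,x)
--
--
--     return result
-- ===== SOURCE B (Python) =====
-- def F(x):
--     if x <= 0:
--         return 0
--     result = 1
--     m = x
--     p = 2
--     while p * p <= m:
--         if m % p == 0:
--             e = 0
--             q = 1
--             while m % p == 0:
--                 m //= p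
--                 e += 1
--                 q *= p
--             result *= (e + 1) * q - e * (q // p)
--         p += 1
--     if m > 1:
--         result *= 2 * m - 1
--     return result
-- ===== Notes on version B (the rewrite author's own statement) =====
-- stated objective: faster
-- what changed: B computes the gcd-sum (Pillai's arithmetic function) from the prime factorization of x by trial division up to sqrt(x), multiplying (e+1)*p^e - e*p^(e-1) per prime power, instead of A's loop summing gcd(i,x) over all i=1..x.
import Mathlib
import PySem

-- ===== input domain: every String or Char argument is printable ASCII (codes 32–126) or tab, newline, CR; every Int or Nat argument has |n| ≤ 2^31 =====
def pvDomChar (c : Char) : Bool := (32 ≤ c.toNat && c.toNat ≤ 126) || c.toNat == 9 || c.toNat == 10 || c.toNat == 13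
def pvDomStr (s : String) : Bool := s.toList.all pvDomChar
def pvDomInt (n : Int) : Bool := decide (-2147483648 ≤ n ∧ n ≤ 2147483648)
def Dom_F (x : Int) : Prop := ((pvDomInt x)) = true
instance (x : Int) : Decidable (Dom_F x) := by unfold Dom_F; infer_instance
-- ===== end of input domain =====

-- B computes the gcd-sum as Pillai's arithmetic function from the prime factorization of x
-- (trial division up to √x) instead of A's loop of x gcd computations (objective: faster).

-- ===== PORT A =====
-- 'while y != 0: (x, y) = (y, x % y)' — structural recursion on a fuel bound; |x % y| < |y|
-- each iteration, so fuel |y|+1 is never exhausted (pyGcdF_natCast below never meets fuel 0)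
def pyGcdF : Nat → Int → Int → Int
  | 0, x, _ => x
  | fuel + 1, x, y => if y = 0 then x else pyGcdF fuel y (PySem.Int.mod x y)

def pyGcd (x y : Int) : Int := pyGcdF (y.natAbs + 1) x y

-- 'a = range(x)' in A is bound and never used (range() raises nothing here), so it leaves no trace
def F (x : Int) : Int :=
  if x = 1 then 1
  else (PySem.List.pyRange 1 (x + 1) 1).foldl (fun result i => result + pyGcd i x) 0

-- ===== PORT B =====
-- 'while m % p == 0: m //= p; e += 1; q *= p' — fuel m.toNat suffices (m shrinks each strip)
def stripLoopF : Nat → Int → Int → Int → Int → Int × Int × Int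
  | 0, m, _, e, q => (m, e, q)
  | fuel + 1, m, p, e, q =>
    if PySem.Int.mod m p = 0 then stripLoopF fuel (PySem.Int.floordiv m p) p (e + 1) (q * p)
    else (m, e, q)

-- 'while p * p <= m: if m % p == 0: …strip…; result *= (e+1)*q - e*(q//p); p += 1'
-- fuel: p grows by 1 per iteration and the loop is over once p > m, so x+1 iterations suffice
def outerLoopF : Nat → Int → Int → Int → Int × Int
  | 0, result, m, _ => (result, m)
  | fuel + 1, result, m, p =>
    if p * p ≤ m then
      if PySem.Int.mod m p = 0 then
        let t := stripLoopF m.toNat m p 0 1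
        outerLoopF fuel (result * ((t.2.1 + 1) * t.2.2 - t.2.1 * PySem.Int.floordiv t.2.2 p))
          t.1 (p + 1)
      else outerLoopF fuel result m (p + 1)
    else (result, m)

def F_alt (x : Int) : Int :=
  if x ≤ 0 then 0
  else
    let t := outerLoopF (x.toNat + 1) 1 x 2
    if 1 < t.2 then t.1 * (2 * t.2 - 1) else t.1

-- ===== PRECONDITION & SPEC =====
def Spec_F (x : Int) (out : Int) : Prop := out = F_alt x
instance (x : Int) (out : Int) : Decidable (Spec_F x out) := by unfold Spec_F; infer_instance

-- ===== CLAIM (what is proved, stated in full; the proofs are below) =====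
def Claim_equal_F : Prop := ∀ (x : Int), Dom_F x → Spec_F x (F x)

-- ===== LEMMAS AND PROOFS =====
lemma stripDec (m p : Int) (hm : 1 ≤ m) (hp : 2 ≤ p) (hd : p ∣ m) :
    1 ≤ PySem.Int.floordiv m p ∧ PySem.Int.floordiv m p < m := by
  obtain ⟨k, rfl⟩ := hd
  rw [PySem.Int.floordiv_eq_ediv_of_pos (by omega), Int.mul_ediv_cancel_left _ (by omega)]
  constructor <;> nlinarith

lemma pyGcdF_natCast (fuel : ℕ) : ∀ b a : ℕ, b < fuel →
    pyGcdF fuel (a : ℤ) (b : ℤ) = (Nat.gcd a b : ℤ) := by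
  induction fuel with
  | zero => omega
  | succ fuel ih =>
    intro b a hb
    rcases Nat.eq_zero_or_pos b with rfl | hbpos
    · simp [pyGcdF]
    · rw [pyGcdF]
      simp only [PySem.Int.mod_natCast]
      rw [if_neg (by exact_mod_cast Nat.pos_iff_ne_zero.1 hbpos),
        ih (a % b) b (by have := Nat.mod_lt a hbpos; omega)]
      rw [Nat.gcd_comm a b, Nat.gcd_rec b a, Nat.gcd_comm]

lemma pyGcd_natCast (b a : ℕ) : pyGcd (a : ℤ) (b : ℤ) = (Nat.gcd a b : ℤ) := by
  rw [pyGcd]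
  exact pyGcdF_natCast _ b a (by omega)

-- Euler's totient as an arithmetic function, and Pillai's function PAF = id ⋆ φ
def phiAF : ArithmeticFunction ℕ := ⟨fun n => Nat.totient n, by simp⟩

lemma phiAF_mult : phiAF.IsMultiplicative :=
  ⟨by simp [phiAF], fun h => Nat.totient_mul h⟩

def PAF : ArithmeticFunction ℕ := ArithmeticFunction.id * phiAF

lemma PAF_mult : PAF.IsMultiplicative := ArithmeticFunction.isMultiplicative_id.mul phiAF_mult

lemma PAF_eq_sum (n : ℕ) : PAF n = ∑ d ∈ n.divisors, d * Nat.totient (n / d) := by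
  rw [PAF, ArithmeticFunction.mul_apply,
    ← Nat.sum_divisorsAntidiagonal (fun a b => a * Nat.totient b)]
  rfl

lemma PAF_one : PAF 1 = 1 := PAF_mult.1

lemma PAF_prime_pow_succ {p : ℕ} (hp : p.Prime) (k : ℕ) :
    PAF (p ^ (k + 1)) = (k + 1) * (p ^ k * (p - 1)) + p ^ (k + 1) := by
  rw [PAF_eq_sum, Nat.sum_divisors_prime_pow hp, Finset.sum_range_succ]
  have hlast : p ^ (k + 1) / p ^ (k + 1) = 1 := Nat.div_self (pow_pos hp.pos _)
  rw [hlast, Nat.totient_one, mul_one]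
  congr 1
  rw [Finset.sum_congr rfl (fun x hx => ?_), Finset.sum_const, Finset.card_range, smul_eq_mul]
  have hx' : x < k + 1 := Finset.mem_range.1 hx
  rw [Nat.pow_div (by omega) hp.pos, Nat.totient_prime_pow hp (by omega)]
  rw [← mul_assoc, ← pow_add]
  congr 2
  omega

lemma PAF_prime_pow_int {p : ℕ} (hp : p.Prime) (k : ℕ) :
    (PAF (p ^ (k + 1)) : ℤ) = ((k : ℤ) + 1 + 1) * (p : ℤ) ^ (k + 1) - ((k : ℤ) + 1) * (p : ℤ) ^ k := by
  rw [PAF_prime_pow_succ hp k]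
  have h1 : (1 : ℕ) ≤ p := hp.pos
  push_cast [h1]
  ring

lemma PAF_prime {p : ℕ} (hp : p.Prime) : (PAF p : ℤ) = 2 * p - 1 := by
  have := PAF_prime_pow_int hp 0
  simpa using this

lemma sum_gcd_shift (n : ℕ) :
    ∑ k ∈ Finset.range n, Nat.gcd n (k + 1) = ∑ k ∈ Finset.range n, Nat.gcd n k := by
  have h1 := Finset.sum_range_succ' (fun k => Nat.gcd n k) n
  have h2 := Finset.sum_range_succ (fun k => Nat.gcd n k) n
  simp only [Nat.gcd_zero_right, Nat.gcd_self] at h1 h2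
  omega

lemma sum_gcd_eq_PAF (n : ℕ) (hn : 0 < n) :
    ∑ k ∈ Finset.range n, Nat.gcd (k + 1) n = PAF n := by
  have hcomm : ∑ k ∈ Finset.range n, Nat.gcd (k + 1) n
      = ∑ k ∈ Finset.range n, Nat.gcd n (k + 1) := by
    simp [Nat.gcd_comm]
  rw [hcomm, sum_gcd_shift n, PAF_eq_sum]
  rw [← Finset.sum_fiberwise_of_maps_to (g := fun k => Nat.gcd n k) (t := n.divisors)
      (fun x _ => Nat.mem_divisors.2 ⟨Nat.gcd_dvd_left _ _, hn.ne'⟩)]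
  refine Finset.sum_congr rfl fun d hd => ?_
  have hdvd : d ∣ n := Nat.dvd_of_mem_divisors hd
  rw [Nat.totient_div_of_dvd hdvd]
  rw [Finset.sum_congr rfl (fun x hx => (Finset.mem_filter.1 hx).2), Finset.sum_const,
    smul_eq_mul, mul_comm]

-- A computes Pillai's function
lemma F_eq_PAF (x : Int) (hx : 1 ≤ x) : F x = (PAF x.toNat : ℤ) := by
  rcases eq_or_lt_of_le hx with h1 | h1
  · rw [F, if_pos h1.symm, ← h1]
    simp [PAF_one]
  · rw [F, if_neg (by omega), PySem.List.pyRange_one, PySem.List.foldl_add, zero_add,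
      List.map_map]
    have hn : (x + 1 - 1).toNat = x.toNat := by omega
    rw [hn]
    have hmap : ∀ k : ℕ, ((fun i => pyGcd i x) ∘ fun k : ℕ => (1 : ℤ) + ↑k) k
        = ((Nat.gcd (k + 1) x.toNat : ℕ) : ℤ) := by
      intro k
      have : (1 : ℤ) + (k : ℤ) = ((k + 1 : ℕ) : ℤ) := by push_cast; ring
      simp only [Function.comp_apply, this]
      have hx' : (x : ℤ) = ((x.toNat : ℕ) : ℤ) := by omega
      rw [hx', pyGcd_natCast, Int.toNat_natCast]
    rw [List.map_congr_left (fun k _ => hmap k)]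
    have : ((List.range x.toNat).map (fun k => ((Nat.gcd (k + 1) x.toNat : ℕ) : ℤ))).sum
        = ∑ k ∈ Finset.range x.toNat, ((Nat.gcd (k + 1) x.toNat : ℕ) : ℤ) := rfl
    rw [this, ← Nat.cast_sum, sum_gcd_eq_PAF _ (by omega)]

lemma stripLoopF_spec (fuel : ℕ) : ∀ m p e q : ℤ, 1 ≤ m → 2 ≤ p → m.toNat ≤ fuel →
    ∃ (k : ℕ) (m' : Int), stripLoopF fuel m p e q = (m', e + k, q * p ^ k)
      ∧ m = m' * p ^ k ∧ ¬ p ∣ m' ∧ 1 ≤ m' := by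
  induction fuel with
  | zero => intro m p e q hm hp hfuel; omega
  | succ fuel ih =>
    intro m p e q hm hp hfuel
    rw [stripLoopF]
    by_cases h : PySem.Int.mod m p = 0
    · rw [if_pos h]
      have hdvd : p ∣ m := (PySem.Int.mod_eq_zero_iff_dvd m p).1 h
      have hdec := stripDec m p hm hp hdvd
      obtain ⟨k, m', heq, hfac, hnd, hm'⟩ :=
        ih (PySem.Int.floordiv m p) p (e + 1) (q * p) hdec.1 hp (by omega)
      refine ⟨k + 1, m', ?_, ?_, hnd, hm'⟩
      · rw [heq]
        refine Prod.ext rfl (Prod.ext ?_ ?_) <;> push_cast <;> ring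
      · obtain ⟨c, rfl⟩ := hdvd
        rw [PySem.Int.floordiv_eq_ediv_of_pos (by omega),
          Int.mul_ediv_cancel_left _ (by omega)] at hfac
        rw [hfac]
        ring
    · rw [if_neg h]
      refine ⟨0, m, by simp, by ring, ?_, hm⟩
      exact fun hd => h ((PySem.Int.mod_eq_zero_iff_dvd m p).2 hd)

lemma outerLoopF_spec (fuel : ℕ) : ∀ result m p : Int, 1 ≤ m → 2 ≤ p →
    (m + 1 - p).toNat < fuel →
    (∀ r : ℕ, 2 ≤ r → (r : ℤ) < p → ¬ (r : ℤ) ∣ m) →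
    (outerLoopF fuel result m p).1 *
      (if 1 < (outerLoopF fuel result m p).2 then 2 * (outerLoopF fuel result m p).2 - 1 else 1)
      = result * (PAF m.toNat : ℤ) := by
  induction fuel with
  | zero => intro result m p hm hp hfuel hnf; omega
  | succ fuel ih =>
    intro result m p hm hp hfuel hnf
    rw [outerLoopF]
    by_cases hpp : p * p ≤ m
    · have hpm : p ≤ m := le_trans (by nlinarith) hpp
      rw [if_pos hpp]
      by_cases hd : PySem.Int.mod m p = 0
      · rw [if_pos hd]
        obtain ⟨k, m', heq, hfac, hnd, hm'⟩ := stripLoopF_spec m.toNat m p 0 1 hm hp le_rfl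
        set t := stripLoopF m.toNat m p 0 1 with ht0
        have h1 : t.1 = m' := by rw [heq]
        have h2 : t.2.1 = (0 : ℤ) + (k : ℤ) := by rw [heq]
        have h3 : t.2.2 = (1 : ℤ) * p ^ k := by rw [heq]
        have hpdvd : p ∣ m := (PySem.Int.mod_eq_zero_iff_dvd m p).1 hd
        have hk : 1 ≤ k := by
          rcases Nat.eq_zero_or_pos k with rfl | hk
          · exfalso
            apply hnd
            rwa [hfac, pow_zero, mul_one] at hpdvd
          · exact hk
        obtain ⟨j, rfl⟩ : ∃ j, k = j + 1 := ⟨k - 1, by omega⟩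
        have hm'le : m' ≤ m := by
          rw [hfac]
          nlinarith [pow_pos (show (0:ℤ) < p by omega) (j + 1),
            one_le_pow₀ (show (1:ℤ) ≤ p by omega) (n := j + 1)]
        have hnf' : ∀ r : ℕ, 2 ≤ r → (r : ℤ) < p + 1 → ¬ (r : ℤ) ∣ t.1 := by
          rw [h1]
          intro r hr2 hrp hdvd
          rcases lt_or_ge (r : ℤ) p with hlt | hge
          · exact hnf r hr2 hlt (hfac ▸ dvd_mul_of_dvd_left hdvd _)
          · have hrp' : (r : ℤ) = p := by omega
            exact hnd (hrp' ▸ hdvd)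
        have hpn : p.toNat.Prime := by
          rw [Nat.prime_def_lt]
          refine ⟨by omega, fun r hrlt hrdvd => ?_⟩
          by_contra hr1
          have hr0 : r ≠ 0 := by
            intro h0
            rw [h0] at hrdvd
            have := Nat.eq_zero_of_zero_dvd hrdvd
            omega
          have hr2 : 2 ≤ r := by omega
          have : (r : ℤ) ∣ m := by
            refine dvd_trans ?_ hpdvd
            have : (r : ℤ) ∣ (p.toNat : ℤ) := Int.natCast_dvd_natCast.2 hrdvd
            rwa [show ((p.toNat : ℕ) : ℤ) = p by omega] at this
          exact hnf r hr2 (by omega) this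
        have hpcast : ((p.toNat : ℕ) : ℤ) = p := by omega
        have hmcast : ((m'.toNat : ℕ) : ℤ) = m' := by omega
        have hmn : m.toNat = p.toNat ^ (j + 1) * m'.toNat := by
          have hcast : ((p.toNat ^ (j + 1) * m'.toNat : ℕ) : ℤ) = m := by
            push_cast [hpcast, hmcast]
            rw [hfac]
            ring
          omega
        have hcop : Nat.Coprime (p.toNat ^ (j + 1)) m'.toNat := by
          refine Nat.Coprime.pow_left _ ((Nat.Prime.coprime_iff_not_dvd hpn).2 ?_)
          intro hdv
          apply hnd
          have := Int.natCast_dvd_natCast.2 hdv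
          rwa [hpcast, hmcast] at this
        refine Eq.trans (ih _ t.1 (p + 1) (h1 ▸ hm') (by omega) (by omega) hnf') ?_
        rw [h1, h2, h3]
        have hfd : PySem.Int.floordiv ((1 : ℤ) * p ^ (j + 1)) p = p ^ j := by
          rw [one_mul, pow_succ, PySem.Int.floordiv_eq_ediv_of_pos (by omega),
            Int.mul_ediv_cancel _ (by omega)]
        rw [hfd, hmn,
          show PAF (p.toNat ^ (j + 1) * m'.toNat) = PAF (p.toNat ^ (j + 1)) * PAF m'.toNat from
            PAF_mult.map_mul_of_coprime hcop]
        have hPp : (PAF (p.toNat ^ (j + 1)) : ℤ)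
            = ((j : ℤ) + 1 + 1) * p ^ (j + 1) - ((j : ℤ) + 1) * p ^ j := by
          rw [PAF_prime_pow_int hpn j, hpcast]
        push_cast [hPp]
        ring
      · rw [if_neg hd]
        refine ih result m (p + 1) hm (by omega) (by omega) ?_
        intro r hr2 hrp hdvd
        rcases lt_or_ge (r : ℤ) p with hlt | hge
        · exact hnf r hr2 hlt hdvd
        · have hrp' : (r : ℤ) = p := by omega
          exact hd ((PySem.Int.mod_eq_zero_iff_dvd m p).2 (hrp' ▸ hdvd))
    · rw [if_neg hpp]
      rcases eq_or_lt_of_le hm with h1 | h1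
      · rw [← h1]
        norm_num [PAF_one]
      · have hprime : m.toNat.Prime := by
          rw [Nat.prime_def_le_sqrt]
          refine ⟨by omega, fun r hr2 hrsqrt hrdvd => ?_⟩
          have hrr : (r : ℤ) * r ≤ m := by
            have h := Nat.le_sqrt.1 hrsqrt
            have h' : ((r * r : ℕ) : ℤ) ≤ ((m.toNat : ℕ) : ℤ) := Int.ofNat_le.2 h
            rw [show ((m.toNat : ℕ) : ℤ) = m by omega] at h'
            push_cast at h'
            exact h'
          have hrltp : (r : ℤ) < p := by
            by_contra hge
            push Not at hge
            have : p * p ≤ (r : ℤ) * r := by nlinarith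
            omega
          have hrm : (r : ℤ) ∣ m := by
            have h := Int.natCast_dvd_natCast.2 hrdvd
            rwa [show ((m.toNat : ℕ) : ℤ) = m by omega] at h
          exact hnf r hr2 hrltp hrm
        simp only []
        rw [if_pos (by simpa using h1), PAF_prime hprime,
          show ((m.toNat : ℕ) : ℤ) = m by omega]

lemma F_alt_eq_PAF (x : Int) (hx : 1 ≤ x) : F_alt x = (PAF x.toNat : ℤ) := by
  rw [F_alt, if_neg (by omega)]
  show (if 1 < (outerLoopF (x.toNat + 1) 1 x 2).2
      then (outerLoopF (x.toNat + 1) 1 x 2).1 * (2 * (outerLoopF (x.toNat + 1) 1 x 2).2 - 1)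
      else (outerLoopF (x.toNat + 1) 1 x 2).1) = (PAF x.toNat : ℤ)
  have h := outerLoopF_spec (x.toNat + 1) 1 x 2 (by omega) (by omega) (by omega)
    (fun r hr2 hrp _ => by omega)
  rw [one_mul] at h
  rw [← h]
  split_ifs <;> ring

-- ===== VERDICT (by name: the statement is the Claim_ definition above) =====
theorem F_spec : Claim_equal_F := by
  intro x _
  unfold Spec_F
  by_cases hx : x ≤ 0
  · rw [F, if_neg (by omega), PySem.List.pyRange_one_eq_nil (by omega), F_alt, if_pos hx]
    rfl
  · rw [F_eq_PAF x (by omega), F_alt_eq_PAF x (by omega)]
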